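-- pv_equiv track=rewrite | github.com/anupyadav27/vul_engine | vuln_db/sources/cve_compatible_os/debian/step1_debian_data_downloader.py | _identify_debian_releases
-- ===== SOURCE A (Python) =====
-- from typing import Dict, List, Any, Optional, Set, Tuple, Union
--
-- def _identify_debian_releases(data: List[Dict[str, Any]]) -> List[str]:
--     """Identify all Debian releases found in the data"""
--     releases = set()
--
--     for record in data:
--         release_data = record.get('releases', {})
--         if isinstance(release_data, dict):
--             releases.update(release_data.keys())
--
--     # Sort releases by typical Debian order
--     release_order = ['experimental', 'sid', 'trixie', 'bookworm', 'bullseye', 'buster', 'stretch']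
--     sorted_releases = []
--
--     for release in release_order:
--         if release in releases:
--             sorted_releases.append(release)
--             releases.remove(release)
--
--     # Add any remaining releases
--     sorted_releases.extend(sorted(releases))
--
--     return sorted_releases
-- ===== SOURCE B (Python) =====
-- from typing import Dict, List, Any
--
--
-- def _identify_debian_releases(data: List[Dict[str, Any]]) -> List[str]:
--     """Identify all Debian releases found in the data"""
--     releases = set()
--
--     for record in data:
--         release_data = record.get('releases', {})
--         if isinstance(release_data, dict):
--             releases.update(release_data.keys())
--
--     release_order = ['experimental', 'sid', 'trixie', 'bookworm', 'bullseye', 'buster', 'stretch']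
--     order_index = {name: i for i, name in enumerate(release_order)}
--
--     # One sort with a composite key: priority releases first in their fixed
--     # order, everything else afterwards alphabetically.
--     return sorted(releases, key=lambda r: (order_index.get(r, len(release_order)), r))
-- ===== Notes on version B (the rewrite author's own statement) =====
-- stated objective: simpler
-- what changed: The two-phase ordering (walk the priority list appending-and-removing matches, then extend with the sorted leftover set) is replaced by a single sorted() call over the collected set with a composite key (priority rank from an enumerate-built index, then the name itself).
import Mathlib
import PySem

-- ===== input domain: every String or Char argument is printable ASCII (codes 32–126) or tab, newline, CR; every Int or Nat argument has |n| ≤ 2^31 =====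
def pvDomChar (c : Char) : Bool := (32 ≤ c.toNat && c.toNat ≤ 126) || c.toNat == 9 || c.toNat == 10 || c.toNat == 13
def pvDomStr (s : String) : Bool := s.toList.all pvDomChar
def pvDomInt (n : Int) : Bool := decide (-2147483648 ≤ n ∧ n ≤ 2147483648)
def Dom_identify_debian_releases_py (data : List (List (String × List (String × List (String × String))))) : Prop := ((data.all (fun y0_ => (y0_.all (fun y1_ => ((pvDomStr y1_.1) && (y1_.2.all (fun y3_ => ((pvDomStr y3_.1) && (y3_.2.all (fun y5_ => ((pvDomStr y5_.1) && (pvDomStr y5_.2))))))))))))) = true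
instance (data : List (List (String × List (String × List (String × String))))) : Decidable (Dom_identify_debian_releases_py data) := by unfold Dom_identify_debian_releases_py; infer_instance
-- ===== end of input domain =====

-- B replaces A's two-phase ordering (priority walk with append-and-remove, then sorted remainder)
-- by ONE sorted() call with a composite (priority-rank, name) key; same return value, objective: simpler.

-- ===== PORT A =====
-- shared collection pass: the 'for record in data: releases.update(record.get("releases", {}).keys())'
-- loop, literally identical in A and in B (isinstance(…, dict) is always true under the typed port)
def pvCollect (data : List (List (String × List (String × List (String × String))))) : PySem.Set String :=
  data.foldl
    (fun releases record =>
      let release_data := (PySem.Dict.mk record).getD "releases" []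
      PySem.Set.update releases (PySem.Dict.keys (PySem.Dict.mk release_data)))
    PySem.Set.empty

def pvReleaseOrder : List String :=
  ["experimental", "sid", "trixie", "bookworm", "bullseye", "buster", "stretch"]

def identify_debian_releases_py (data : List (List (String × List (String × List (String × String))))) : List String :=
  let releases := pvCollect data
  let p := pvReleaseOrder.foldl
    (fun (st : List String × PySem.Set String) release =>
      if PySem.Set.contains st.2 release then
        -- releases.remove(release) is guarded by the membership test, so discard is exact here
        (st.1 ++ [release], PySem.Set.discard st.2 release)
      else st)
    ([], releases)
  p.1 ++ PySem.List.sorted p.2 (fun x => x)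

-- ===== PORT B =====
def identify_debian_releases_py_alt (data : List (List (String × List (String × List (String × String))))) : List String :=
  let releases := pvCollect data
  let order_index : PySem.Dict String Int :=
    (PySem.List.enumerate pvReleaseOrder).foldl (fun d q => d.insert q.2 q.1) PySem.Dict.empty
  PySem.List.sorted2 releases
    (fun r => order_index.getD r (Int.ofNat pvReleaseOrder.length)) (fun r => r)

-- ===== PRECONDITION & SPEC =====
def Spec_identify_debian_releases_py (data : List (List (String × List (String × List (String × String))))) (out : List String) : Prop := out = identify_debian_releases_py_alt data
instance (data : List (List (String × List (String × List (String × String))))) (out : List String) : Decidable (Spec_identify_debian_releases_py data out) := by unfold Spec_identify_debian_releases_py; infer_instance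

-- ===== CLAIM (what is proved, stated in full; the proofs are below) =====
def Claim_equal_identify_debian_releases_py : Prop := ∀ (data : List (List (String × List (String × List (String × String))))), Dom_identify_debian_releases_py data → Spec_identify_debian_releases_py data (identify_debian_releases_py data)

-- ===== LEMMAS AND PROOFS =====

-- B's composite key, as a single lexicographically ordered key
def pvDict : PySem.Dict String Int :=
  (PySem.List.enumerate pvReleaseOrder).foldl (fun d q => d.insert q.2 q.1) PySem.Dict.empty

def pvRank (r : String) : Int := pvDict.getD r (Int.ofNat pvReleaseOrder.length)

def pvKey (r : String) : Lex (Int × String) := toLex (pvRank r, r)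

lemma pvCollect_nodup (data : List (List (String × List (String × List (String × String))))) :
    (pvCollect data).Nodup := by
  have h : ∀ (d : List (List (String × List (String × List (String × String)))))
      (s : PySem.Set String), s.Nodup →
      (d.foldl
        (fun releases record =>
          let release_data := (PySem.Dict.mk record).getD "releases" []
          PySem.Set.update releases (PySem.Dict.keys (PySem.Dict.mk release_data)))
        s).Nodup := by
    intro d
    induction d with
    | nil => intro s hs; simpa using hs
    | cons r t ih =>
      intro s hs
      simp only [List.foldl_cons]
      exact ih _ (PySem.Set.nodup_update _ _ hs)
  exact h data PySem.Set.empty List.nodup_nil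

lemma sorted2_eq_sorted_key (xs : List String) :
    PySem.List.sorted2 xs (fun r => pvRank r) (fun r => r) = PySem.List.sorted xs pvKey := by
  rw [PySem.List.sorted_eq_foldl_insertBy]
  show List.foldl _ [] xs = _
  congr 1
  funext acc x
  congr 1
  funext a b
  have h : ∀ u v : String,
      (decide (pvRank u < pvRank v) || (!decide (pvRank v < pvRank u) && decide (u < v)))
        = decide (pvKey u < pvKey v) := by
    intro u v
    have hlt : pvKey u < pvKey v ↔ (pvRank u < pvRank v ∨ pvRank u = pvRank v ∧ u < v) :=
      Prod.Lex.lt_iff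
    by_cases h1 : pvRank u < pvRank v
    · simp [h1, hlt]
    · by_cases h2 : pvRank v < pvRank u
      · have : ¬ pvKey u < pvKey v := by
          rw [hlt]
          rintro (h | ⟨he, -⟩)
          · exact h1 h
          · exact absurd he.symm (ne_of_lt h2)
        simp [h1, h2, this]
      · have he : pvRank u = pvRank v := le_antisymm (not_lt.mp h2) (not_lt.mp h1)
        by_cases h3 : u < v
        · have : pvKey u < pvKey v := hlt.mpr (Or.inr ⟨he, h3⟩)
          simp [h1, h2, h3, this]
        · have : ¬ pvKey u < pvKey v := by
            rw [hlt]
            rintro (h | ⟨-, hv⟩)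
            · exact h1 h
            · exact h3 hv
          simp [h1, h2, h3, this]
  exact h a b

lemma loop_char (ord : List String) (acc : List String) (rel : PySem.Set String)
    (hord : ord.Nodup) (hrel : rel.Nodup) :
    ∃ rem : List String,
      ord.foldl
        (fun (st : List String × PySem.Set String) release =>
          if PySem.Set.contains st.2 release then
            (st.1 ++ [release], PySem.Set.discard st.2 release)
          else st) (acc, rel)
        = (acc ++ ord.filter (fun r => PySem.Set.contains rel r), rem)
      ∧ rem.Nodup ∧ (∀ x, x ∈ rem ↔ x ∈ rel ∧ x ∉ ord) := by
  induction ord generalizing acc rel with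
  | nil =>
    exact ⟨rel, by simp, hrel, fun x => by simp⟩
  | cons o t ih =>
    have hot : o ∉ t := (List.nodup_cons.mp hord).1
    have ht : t.Nodup := (List.nodup_cons.mp hord).2
    by_cases ho : o ∈ rel
    · have hco : PySem.Set.contains rel o = true := (PySem.Set.contains_iff _ _).mpr ho
      obtain ⟨rem, heq, hnd, hmem⟩ := ih (acc ++ [o]) (PySem.Set.discard rel o) ht (PySem.Set.nodup_discard _ _ hrel)
      refine ⟨rem, ?_, hnd, ?_⟩
      · simp only [List.foldl_cons, hco, if_true]
        rw [heq]
        have hfil : t.filter (fun r => PySem.Set.contains (PySem.Set.discard rel o) r)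
            = t.filter (fun r => PySem.Set.contains rel r) := by
          apply List.filter_congr
          intro r hr
          have hro : r ≠ o := fun h => hot (h ▸ hr)
          have hiff : (PySem.Set.discard rel o).contains r = true ↔ PySem.Set.contains rel r = true := by
            simp [PySem.Set.mem_discard, hro]
          exact Bool.eq_iff_iff.mpr hiff
        rw [hfil]
        simp [ho, List.append_assoc]
      · intro x
        rw [hmem x]
        constructor
        · rintro ⟨hx, hxt⟩
          have := (PySem.Set.mem_discard _ _ _).mp hx
          exact ⟨this.1, by simp [this.2, hxt]⟩
        · rintro ⟨hx, hxot⟩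
          simp only [List.mem_cons, not_or] at hxot
          exact ⟨(PySem.Set.mem_discard _ _ _).mpr ⟨hx, hxot.1⟩, hxot.2⟩
    · have hco : PySem.Set.contains rel o = false := by
        by_contra h
        exact ho ((PySem.Set.contains_iff _ _).mp (by simpa using h))
      obtain ⟨rem, heq, hnd, hmem⟩ := ih acc rel ht hrel
      refine ⟨rem, ?_, hnd, ?_⟩
      · simp only [List.foldl_cons, hco, Bool.false_eq_true, if_false]
        rw [heq, List.filter_cons_of_neg (by simpa using hco)]
      · intro x
        rw [hmem x]
        constructor
        · rintro ⟨hx, hxt⟩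
          refine ⟨hx, ?_⟩
          simp only [List.mem_cons, not_or]
          exact ⟨fun h => ho (h ▸ hx), hxt⟩
        · rintro ⟨hx, hxot⟩
          simp only [List.mem_cons, not_or] at hxot
          exact ⟨hx, hxot.2⟩

lemma pvRank_of_not_mem (x : String) (hx : x ∉ pvReleaseOrder) : pvRank x = 7 := by
  simp [pvReleaseOrder] at hx
  obtain ⟨h1,h2,h3,h4,h5,h6,h7⟩ := hx
  have hd : pvDict = PySem.Dict.mk [("experimental",0),("sid",1),("trixie",2),("bookworm",3),("bullseye",4),("buster",5),("stretch",6)] := by decide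
  simp only [pvRank, hd, PySem.Dict.getD_eq_get?_getD, PySem.Dict.get?_mk_cons,
    beq_iff_eq, if_neg (Ne.symm h1), if_neg (Ne.symm h2), if_neg (Ne.symm h3),
    if_neg (Ne.symm h4), if_neg (Ne.symm h5), if_neg (Ne.symm h6), if_neg (Ne.symm h7)]
  rfl

lemma pvRank_le_of_mem (x : String) (hx : x ∈ pvReleaseOrder) : pvRank x ≤ 6 := by
  simp [pvReleaseOrder] at hx
  rcases hx with h | h | h | h | h | h | h <;> subst h <;> decide

lemma pvOrder_pairwise : pvReleaseOrder.Pairwise (fun a b => pvKey a < pvKey b) := by decide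

lemma pairwise_lt_of_le_nodup (l : List String)
    (hle : l.Pairwise (fun a b => a ≤ b)) (hnd : l.Nodup) :
    l.Pairwise (fun a b => a < b) :=
  (hle.and hnd).imp (fun h => lt_of_le_of_ne h.1 h.2)

theorem identify_debian_releases_py_spec : Claim_equal_identify_debian_releases_py := by
  intro data _
  unfold Spec_identify_debian_releases_py identify_debian_releases_py identify_debian_releases_py_alt
  simp only []
  set s := pvCollect data with hs_def
  have hs : s.Nodup := pvCollect_nodup data
  have hord : pvReleaseOrder.Nodup := by decide
  obtain ⟨rem, heq, hremnd, hremmem⟩ := loop_char pvReleaseOrder [] s hord hs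
  rw [heq]
  -- B's side: the fold building order_index is definitionally pvDict, its key pvRank
  show ([] ++ pvReleaseOrder.filter (fun r => PySem.Set.contains s r))
        ++ PySem.List.sorted rem (fun x => x)
      = PySem.List.sorted2 s (fun r => pvRank r) (fun r => r)
  rw [sorted2_eq_sorted_key]
  set Pri := pvReleaseOrder.filter (fun r => PySem.Set.contains s r) with hPri
  set S := PySem.List.sorted rem (fun x => x) with hS
  have hSperm : S.Perm rem := PySem.List.sorted_perm rem (fun x => x) false
  have hSnd : S.Nodup := hSperm.symm.nodup hremnd
  have hSmem : ∀ x, x ∈ S ↔ x ∈ s ∧ x ∉ pvReleaseOrder := by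
    intro x
    rw [hS, PySem.List.mem_sorted, hremmem]
  have hPrimem : ∀ x, x ∈ Pri ↔ x ∈ pvReleaseOrder ∧ x ∈ s := by
    intro x
    rw [hPri, List.mem_filter]
    exact and_congr_right (fun _ => by rw [PySem.Set.contains_iff])
  have hPrind : Pri.Nodup := List.Sublist.nodup List.filter_sublist hord
  have hnodup : (Pri ++ S).Nodup := by
    rw [List.nodup_append]
    refine ⟨hPrind, hSnd, ?_⟩
    intro a ha b hb hab
    exact ((hSmem b).mp hb).2 (hab ▸ ((hPrimem a).mp ha).1)
  have hperm : (Pri ++ S).Perm s := by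
    rw [List.perm_ext_iff_of_nodup hnodup hs]
    intro a
    rw [List.mem_append, hPrimem a, hSmem a]
    constructor
    · rintro (⟨-, h⟩ | ⟨h, -⟩) <;> exact h
    · intro h
      by_cases hm : a ∈ pvReleaseOrder
      · exact Or.inl ⟨hm, h⟩
      · exact Or.inr ⟨h, hm⟩
  have hpair : (Pri ++ S).Pairwise (fun a b => pvKey a < pvKey b) := by
    rw [List.pairwise_append]
    refine ⟨List.Pairwise.sublist List.filter_sublist pvOrder_pairwise, ?_, ?_⟩
    · have hle : S.Pairwise (fun a b => a ≤ b) := by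
        rw [hS]; exact PySem.List.sorted_pairwise rem (fun x => x)
      have hlt := pairwise_lt_of_le_nodup S hle hSnd
      refine hlt.imp_of_mem ?_
      intro a b ha hb hab
      have h7a : pvRank a = 7 := pvRank_of_not_mem a ((hSmem a).mp ha).2
      have h7b : pvRank b = 7 := pvRank_of_not_mem b ((hSmem b).mp hb).2
      exact Prod.Lex.lt_iff.mpr (Or.inr ⟨by simp [pvKey, h7a, h7b], hab⟩)
    · intro a ha b hb
      have h6 : pvRank a ≤ 6 := pvRank_le_of_mem a ((hPrimem a).mp ha).1
      have h7 : pvRank b = 7 := pvRank_of_not_mem b ((hSmem b).mp hb).2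
      refine Prod.Lex.lt_iff.mpr (Or.inl ?_)
      show pvRank a < pvRank b
      omega
  have := PySem.List.sorted_eq_of_perm_of_pairwise_lt s (Pri ++ S) pvKey hperm hpair
  rw [List.nil_append, ← this]
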